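-- pv_equiv track=rewrite | github.com/pirayan20/2110101_Com_Prog | Grader/09/09_NestedList_★★★_Fill_In_Numbers.py | pattern5
-- ===== SOURCE A (Python) =====
-- def pattern5(n):
--     l = []
--     for i in range(n):
--         num = i + 1
--         c = []
--         c += [0]*i
--         for j in range(n - len(c)):
--             c.append(num)
--             num += n-j
--         l.append(c)
--     return l
-- ===== SOURCE B (Python) =====
-- def pattern5(n):
--     # Closed form: diagonal d starts at value d*(2*n - d + 1)//2 + 1; the entry of
--     # row i at offset j past the zeros is starts[j] + i + 1.  The starts are
--     # computed once, then every row is zeros followed by a shifted prefix of them.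
--     starts = [j * (2 * n - j + 1) // 2 for j in range(n)]
--     return [[0] * i + [s + i + 1 for s in starts[:n - i]] for i in range(n)]
-- ===== Notes on version B (the rewrite author's own statement) =====
-- stated objective: alternative
-- what changed: Replaces A's stateful fill (a running value 'num' updated by 'num += n-j' while appending to each growing row) with a closed form: the diagonal start values j*(2n-j+1)//2 are computed once, and every row is zeros followed by a shifted prefix of that list, with no carried state.
import Mathlib
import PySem

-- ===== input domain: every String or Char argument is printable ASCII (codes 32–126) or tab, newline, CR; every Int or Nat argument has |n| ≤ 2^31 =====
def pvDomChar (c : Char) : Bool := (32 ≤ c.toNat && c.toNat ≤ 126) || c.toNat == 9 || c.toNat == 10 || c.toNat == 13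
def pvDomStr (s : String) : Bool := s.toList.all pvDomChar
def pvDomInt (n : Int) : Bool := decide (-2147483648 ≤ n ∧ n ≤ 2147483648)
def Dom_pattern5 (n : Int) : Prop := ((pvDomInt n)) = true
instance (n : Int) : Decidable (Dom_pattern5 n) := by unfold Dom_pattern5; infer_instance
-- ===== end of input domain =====

-- B replaces A's running-counter fill with a closed-form expression per entry (objective: alternative, same cost).

-- ===== PORT A =====
def pattern5 (n : Int) : List (List Int) :=
  (PySem.List.pyRange 0 n 1).foldl (fun l i =>
    let num : Int := i + 1
    let c : List Int := List.replicate i.toNat (0 : Int)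
    let r := (PySem.List.pyRange 0 (n - (c.length : Int)) 1).foldl
      (fun (p : List Int × Int) j => (p.1 ++ [p.2], p.2 + (n - j))) (c, num)
    l ++ [r.1]) []

-- ===== PORT B =====
def pattern5_alt (n : Int) : List (List Int) :=
  let starts := (PySem.List.pyRange 0 n 1).map (fun j =>
    PySem.Int.floordiv (j * (2 * n - j + 1)) 2)
  (PySem.List.pyRange 0 n 1).map (fun i =>
    List.replicate i.toNat (0 : Int) ++
      (PySem.List.slice starts none (some (n - i))).map (fun s => s + i + 1))

-- ===== PRECONDITION & SPEC =====
def Spec_pattern5 (n : Int) (out : List (List Int)) : Prop := out = pattern5_alt n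
instance (n : Int) (out : List (List Int)) : Decidable (Spec_pattern5 n out) := by unfold Spec_pattern5; infer_instance

-- ===== CLAIM (what is proved, stated in full; the proofs are below) =====
def Claim_equal_pattern5 : Prop := ∀ (n : Int), Dom_pattern5 n → Spec_pattern5 n (pattern5 n)

-- ===== LEMMAS AND PROOFS =====

-- the value A's variable 'num' holds after t iterations of the inner loop of row i
def pvValA (n i : Int) : Nat → Int
  | 0 => i + 1
  | t + 1 => pvValA n i t + (n - t)

lemma pv_floordiv_two_eq (a k : Int) (h : a = 2 * k) : PySem.Int.floordiv a 2 = k := by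
  rw [PySem.Int.floordiv_eq_ediv_of_pos (by norm_num), h]
  omega

lemma pvValA_eq (n i : Int) (t : Nat) :
    pvValA n i t = PySem.Int.floordiv ((t : Int) * (2 * n - t + 1)) 2 + i + 1 := by
  induction t with
  | zero => simp [pvValA]
  | succ t ih =>
    obtain ⟨k, hk⟩ : Even ((t : Int) * ((t : Int) + 1)) := Int.even_mul_succ_self _
    have h1 : PySem.Int.floordiv ((t : Int) * (2 * n - t + 1)) 2 = (t : Int) * n - k + t :=
      pv_floordiv_two_eq _ _ (by nlinarith [hk])
    have h2 : PySem.Int.floordiv (((t : Int) + 1) * (2 * n - ((t : Int) + 1) + 1)) 2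
        = ((t : Int) + 1) * n - k :=
      pv_floordiv_two_eq _ _ (by nlinarith [hk])
    rw [pvValA, ih, h1]
    push_cast
    rw [h2]
    ring

lemma pvInner (n i : Int) (m : Nat) (c0 : List Int) :
    (PySem.List.pyRange 0 (m : Int) 1).foldl
        (fun (p : List Int × Int) j => (p.1 ++ [p.2], p.2 + (n - j))) (c0, i + 1)
      = (c0 ++ (List.range m).map (pvValA n i), pvValA n i m) := by
  induction m with
  | zero =>
    rw [show ((0 : Nat) : Int) = 0 from rfl, PySem.List.pyRange_one_eq_nil (le_refl 0)]
    simp [pvValA]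
  | succ m ih =>
    have h : ((m + 1 : Nat) : Int) = (m : Int) + 1 := by push_cast; ring
    rw [h, PySem.List.pyRange_one_succ_right (a := 0) (b := (m : Int)) (by positivity),
        List.foldl_append, ih]
    simp [List.range_succ, pvValA]

-- ===== VERDICT (by name: the statement is the Claim_ definition above) =====
theorem pattern5_spec : Claim_equal_pattern5 := by
  intro n _
  unfold Spec_pattern5 pattern5 pattern5_alt
  rw [PySem.List.foldl_append_singleton_eq_map]
  simp only [List.nil_append]
  apply List.map_congr_left
  intro i hi
  obtain ⟨hi0, hin⟩ := (PySem.List.mem_pyRange_one).1 hi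
  have hlen : ((List.replicate i.toNat (0 : Int)).length : Int) = i := by
    simp [Int.toNat_of_nonneg hi0]
  have hm : (n - i) = (((n - i).toNat : Nat) : Int) := (Int.toNat_of_nonneg (by omega)).symm
  simp only [hlen]
  rw [hm, pvInner]
  dsimp only
  rw [PySem.List.slice_to_natCast, List.map_take, List.map_map, PySem.List.pyRange_one,
      List.map_map, ← List.map_take, List.take_range]
  rw [show min (n - i).toNat (n - 0).toNat = (n - i).toNat from by omega]
  congr 1
  apply List.map_congr_left
  intro t ht
  simp only [Function.comp]
  rw [pvValA_eq]
  norm_num
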